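-- pv_equiv track=rewrite | github.com/nornen0202/TradingAgents | tradingagents/portfolio/instrument_identity.py | _looks_like_symbol
-- ===== SOURCE A (Python) =====
-- def _looks_like_symbol(value: str) -> bool:
--     symbol = str(value or "").strip().upper()
--     if not symbol:
--         return False
--     if " " in symbol:
--         return False
--     if symbol[0] == "." or symbol[-1] == "." or symbol.count(".") > 1:
--         return False
--     return all(ch.isalnum() or ch in {".", "-"} for ch in symbol)
-- ===== SOURCE B (Python) =====
-- def _looks_like_symbol(value: str) -> bool:
--     # One-pass validator: scan the normalized string once, tracking whether a
--     # dot was already used and whether the current dot-separated segment has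
--     # at least one character. No indexing, counting or membership passes.
--     symbol = str(value or "").strip().upper()
--     seen_dot = False
--     pending = False
--     for ch in symbol:
--         if ch == ".":
--             if seen_dot or not pending:
--                 return False
--             seen_dot = True
--             pending = False
--         elif ch.isalnum() or ch == "-":
--             pending = True
--         else:
--             return False
--     return pending
-- ===== Notes on version B (the rewrite author's own statement) =====
-- stated objective: alternative
-- what changed: Replaces A's four separate passes over the string (substring membership test for a space, first/last character indexing, a dot count, and a final all() pass) by a single left-to-right scan with two Boolean state variables (dot already seen, current segment non-empty) that rejects early.
import Mathlib
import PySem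

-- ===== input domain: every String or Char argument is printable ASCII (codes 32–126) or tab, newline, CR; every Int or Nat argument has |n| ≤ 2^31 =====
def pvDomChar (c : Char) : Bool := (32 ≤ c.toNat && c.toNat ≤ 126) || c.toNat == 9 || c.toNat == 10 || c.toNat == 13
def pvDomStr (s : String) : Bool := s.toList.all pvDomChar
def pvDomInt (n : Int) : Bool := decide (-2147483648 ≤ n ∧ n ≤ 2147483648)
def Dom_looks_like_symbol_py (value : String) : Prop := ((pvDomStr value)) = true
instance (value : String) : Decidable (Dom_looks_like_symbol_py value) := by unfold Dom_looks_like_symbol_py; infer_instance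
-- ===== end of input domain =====

-- B replaces A's four separate passes (substring test, first/last indexing, dot count, all()) by
-- a single left-to-right scan with two state Booleans; objective: alternative single-pass decomposition.

-- ===== PORT A =====
def looks_like_symbol_py (value : String) : Bool :=
  -- symbol = str(value or "").strip().upper()
  let symbol := PySem.Str.upper (PySem.Str.strip (if value == "" then "" else value))
  if symbol == "" then false
  else if PySem.Str.isIn " " symbol then false
  else if (PySem.Str.pyGet? symbol 0 == some '.') || (PySem.Str.pyGet? symbol (-1) == some '.')
          || decide (1 < PySem.Str.count symbol ".") then false
  else symbol.toList.all (fun ch => PySem.Chars.isalnum ch || (ch == '.' || ch == '-'))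

-- ===== PORT B =====
-- the for-loop of Source B with its two state Booleans (seen_dot, pending); early returns become false
def pvScanB : List Char → Bool → Bool → Bool
  | [], _, pending => pending
  | ch :: t, seenDot, pending =>
    if ch == '.' then
      if seenDot || !pending then false else pvScanB t true false
    else if PySem.Chars.isalnum ch || ch == '-' then pvScanB t seenDot true
    else false

def looks_like_symbol_py_alt (value : String) : Bool :=
  let symbol := PySem.Str.upper (PySem.Str.strip (if value == "" then "" else value))
  pvScanB symbol.toList false false

-- ===== PRECONDITION & SPEC =====
def Spec_looks_like_symbol_py (value : String) (out : Bool) : Prop := out = looks_like_symbol_py_alt value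
instance (value : String) (out : Bool) : Decidable (Spec_looks_like_symbol_py value out) := by unfold Spec_looks_like_symbol_py; infer_instance

-- ===== CLAIM (what is proved, stated in full; the proofs are below) =====
def Claim_equal_looks_like_symbol_py : Prop := ∀ (value : String), Dom_looks_like_symbol_py value → Spec_looks_like_symbol_py value (looks_like_symbol_py value)

-- ===== LEMMAS AND PROOFS =====

-- characters accepted inside a dot-separated segment
def pvP (c : Char) : Bool := PySem.Chars.isalnum c || c == '-'

-- characterization of the scan state machine
lemma pvScanB_iff : ∀ (l : List Char) (sd pd : Bool), pvScanB l sd pd = true ↔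
    ((∀ c ∈ l, (pvP c || c == '.') = true) ∧
     l.count '.' + (cond sd 1 0) ≤ 1 ∧
     (pd = true ∨ l.head? ≠ some '.') ∧
     (match l with | [] => pd = true | _ :: _ => l.getLast? ≠ some '.')) := by
  intro l
  induction l with
  | nil => intro sd pd; cases sd <;> simp [pvScanB]
  | cons c t ih =>
    intro sd pd
    by_cases hc : c = '.'
    · subst hc
      simp only [pvScanB, beq_self_eq_true, if_true]
      by_cases hsd : sd = true
      · subst hsd
        constructor
        · intro h
          by_cases hpd : pd = true <;> simp [hpd] at h
        · rintro ⟨-, hcnt, -, -⟩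
          exfalso; simp [List.count_cons] at hcnt
      · have hsd' : sd = false := by revert hsd; cases sd <;> simp
        subst hsd'
        by_cases hpd : pd = true
        · subst hpd
          simp only [Bool.or_false, Bool.not_true]
          rw [if_neg (by simp), ih true false]
          constructor
          · rintro ⟨hall, hcnt, hhd, hlast⟩
            have hcnt0 : t.count '.' = 0 := by simpa using hcnt
            have hmem : '.' ∉ t := by
              intro hm; exact absurd (List.count_pos_iff.mpr hm) (by omega)
            refine ⟨?_, ?_, Or.inl trivial, ?_⟩
            · intro x hx
              rcases List.mem_cons.mp hx with h | h
              · subst h; decide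
              · exact hall x h
            · simp [List.count_cons, hcnt0]
            · cases t with
              | nil => cases hlast
              | cons d u =>
                simpa using hlast
          · rintro ⟨hall, hcnt, -, hlast⟩
            have hcnt0 : t.count '.' = 0 := by
              simp [List.count_cons] at hcnt; omega
            have hmem : '.' ∉ t := by
              intro hm; exact absurd (List.count_pos_iff.mpr hm) (by omega)
            cases t with
            | nil => simp at hlast
            | cons d u =>
              have hd : d ≠ '.' := fun h => hmem (h ▸ List.mem_cons_self)
              refine ⟨fun x hx => hall x (List.mem_cons_of_mem _ hx), by simp [hcnt0], Or.inr (by simpa using hd), by simpa using hlast⟩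
        · have hpd' : pd = false := by revert hpd; cases pd <;> simp
          subst hpd'
          simp only [Bool.not_false, Bool.or_true, if_true]
          constructor
          · intro h; cases h
          · rintro ⟨-, -, hhd, -⟩
            rcases hhd with h | h
            · cases h
            · simp at h
    · have hcb : (c == '.') = false := by simpa using hc
      by_cases hgood : pvP c = true
      · have : pvScanB (c :: t) sd pd = pvScanB t sd true := by
          simp [pvScanB, hcb]; intro h; rw [pvP] at hgood; simp [h] at hgood; simp [hgood]
        rw [this, ih sd true]
        constructor
        · rintro ⟨hall, hcnt, -, hlast⟩
          refine ⟨?_, ?_, Or.inr (by simpa using hc), ?_⟩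
          · intro x hx
            rcases List.mem_cons.mp hx with h | h
            · subst h; simp [hgood]
            · exact hall x h
          · simpa [List.count_cons, hcb] using hcnt
          · cases t with
            | nil => simpa using hc
            | cons d u => simpa using hlast
        · rintro ⟨hall, hcnt, -, hlast⟩
          refine ⟨fun x hx => hall x (List.mem_cons_of_mem _ hx), by simpa [List.count_cons, hcb] using hcnt, Or.inl rfl, ?_⟩
          cases t with
          | nil => rfl
          | cons d u => simpa using hlast
      · have hPb : pvP c = false := by revert hgood; cases pvP c <;> simp
        have : pvScanB (c :: t) sd pd = false := by
          rw [pvP] at hPb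
          rw [Bool.or_eq_false_iff] at hPb
          simp [pvScanB, hcb, hPb.1, hPb.2]
        rw [this]
        constructor
        · intro h; cases h
        · rintro ⟨hall, -, -, -⟩
          have := hall c List.mem_cons_self
          rw [hPb, hcb] at this
          cases this

-- Chars.count with a single-character needle is List.count
lemma pvCountGo_singleton (c : Char) : ∀ (fuel : ℕ) (l : List Char) (acc : ℕ),
    l.length ≤ fuel → PySem.Chars.count.go [c] fuel l acc = acc + l.count c := by
  intro fuel
  induction fuel with
  | zero =>
    intro l acc h
    have : l = [] := List.eq_nil_of_length_eq_zero (Nat.le_zero.mp h)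
    subst this; simp [PySem.Chars.count.go]
  | succ n ih =>
    intro l acc h
    cases l with
    | nil => simp [PySem.Chars.count.go]
    | cons d t =>
      by_cases hd : d = c
      · subst hd
        have : [d].isPrefixOf (d :: t) = true := by simp [List.isPrefixOf]
        simp only [PySem.Chars.count.go, this, if_true]
        have hdrop : List.drop [d].length (d :: t) = t := rfl
        rw [hdrop, ih t (acc + 1) (by simpa using h)]
        simp [List.count_cons]
        omega
      · have : [c].isPrefixOf (d :: t) = false := by
          simp [List.isPrefixOf]
          exact fun h' => absurd h'.symm hd
        simp only [PySem.Chars.count.go, this, if_false]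
        rw [ih t acc (by simpa using h)]
        simp [List.count_cons, hd]

lemma pvCount_singleton (l : List Char) (c : Char) :
    PySem.Chars.count l [c] = l.count c := by
  simp only [PySem.Chars.count, List.isEmpty_cons, if_false]
  simpa using pvCountGo_singleton c l.length l 0 le_rfl

-- pyGet? at -1 is the last element
lemma pvPyGet_neg_one {α : Type} (l : List α) (h : l ≠ []) :
    PySem.List.pyGet? l (-1) = l.getLast? := by
  have hlen : 1 ≤ l.length := List.length_pos_of_ne_nil h
  simp only [PySem.List.pyGet?, PySem.List.pyIdx?]
  have hlen' : (1:ℤ) ≤ (l.length:ℤ) := by exact_mod_cast hlen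
  have h1 : ¬ ((0:ℤ) ≤ -1) := by norm_num
  have h2 : (-(l.length:ℤ) ≤ -1) := by omega
  simp only [h1, if_false, h2, if_true, Option.bind_some]
  have : l.length - ((1:ℤ)).toNat = l.length - 1 := rfl
  rw [List.getLast?_eq_getElem?]
  rfl

-- the main equivalence, stated over the normalized character list
lemma pvMain (l : List Char) :
    (if l = [] then false
     else if PySem.Chars.isIn [' '] l then false
     else if (l[0]? == some '.') || (PySem.List.pyGet? l (-1) == some '.') || decide (1 < l.count '.') then false
     else l.all (fun ch => PySem.Chars.isalnum ch || (ch == '.' || ch == '-')))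
    = pvScanB l false false := by
  by_cases hnil : l = []
  · subst hnil; simp [pvScanB]
  · rw [if_neg hnil]
    by_cases hsp : ' ' ∈ l
    · have hin : PySem.Chars.isIn [' '] l = true := by
        rw [PySem.Chars.isIn_iff_infix, List.singleton_infix_iff]; exact hsp
      rw [hin, if_pos rfl]
      symm
      rw [← Bool.not_eq_true]
      rw [pvScanB_iff]
      rintro ⟨hall, -, -, -⟩
      have := hall ' ' hsp
      cases this
    · have hin : PySem.Chars.isIn [' '] l = false := by
        rw [← Bool.not_eq_true, PySem.Chars.isIn_iff_infix, List.singleton_infix_iff]; exact hsp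
      rw [hin, if_neg (by simp)]
      rw [pvPyGet_neg_one l hnil]
      cases hbad : ((l[0]? == some '.') || (l.getLast? == some '.') || decide (1 < l.count '.')) with
      | true =>
        rw [if_pos rfl]
        symm
        rw [← Bool.not_eq_true, pvScanB_iff]
        rintro ⟨-, hcnt, hhd, hlast⟩
        rcases hhd with h | hhd
        · cases h
        rcases Bool.or_eq_true_iff.mp hbad with h | h
        · rcases Bool.or_eq_true_iff.mp h with h' | h'
          · exact hhd (by rw [List.head?_eq_getElem?]; exact of_decide_eq_true (by simpa using h'))
          · cases l with
            | nil => exact hnil rfl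
            | cons a t => exact hlast (of_decide_eq_true (by simpa using h'))
        · have : 1 < l.count '.' := of_decide_eq_true h
          omega
      | false =>
        rw [if_neg (by simp)]
        rw [Bool.or_eq_false_iff, Bool.or_eq_false_iff] at hbad
        obtain ⟨⟨h0, hL⟩, hC⟩ := hbad
        have hcnt : l.count '.' ≤ 1 := by
          have := of_decide_eq_false hC; omega
        have hhd : l.head? ≠ some '.' := by
          rw [List.head?_eq_getElem?]; intro h; simp [h] at h0
        have hlast : l.getLast? ≠ some '.' := by
          intro h; simp [h] at hL
        cases hB : pvScanB l false false
        · rw [← Bool.not_eq_true, pvScanB_iff] at hB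
          push_neg at hB
          rw [← Bool.not_eq_true]
          intro hall
          rw [List.all_eq_true] at hall
          apply hB
          · intro x hx
            have := hall x hx
            rw [pvP]
            revert this
            cases hx1 : PySem.Chars.isalnum x <;> cases hx2 : x == '.' <;> cases hx3 : x == '-' <;> simp
          · simpa using hcnt
          · exact Or.inr hhd
          · cases l with
            | nil => exact absurd rfl hnil
            | cons a t => exact hlast
        · rw [pvScanB_iff] at hB
          obtain ⟨hall, -, -, -⟩ := hB
          rw [List.all_eq_true]
          intro x hx
          have := hall x hx
          rw [pvP] at this
          revert this
          cases hx1 : PySem.Chars.isalnum x <;> cases hx2 : x == '.' <;> cases hx3 : x == '-' <;> simp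

-- the bodies of the two ports agree for every normalized string
lemma pvBody (symbol : String) :
    (if symbol == "" then false
     else if PySem.Str.isIn " " symbol then false
     else if (PySem.Str.pyGet? symbol 0 == some '.') || (PySem.Str.pyGet? symbol (-1) == some '.')
             || decide (1 < PySem.Str.count symbol ".") then false
     else symbol.toList.all (fun ch => PySem.Chars.isalnum ch || (ch == '.' || ch == '-')))
    = pvScanB symbol.toList false false := by
  have hget0 : PySem.Str.pyGet? symbol 0 = symbol.toList[(0:Int).toNat]? := by
    simpa using PySem.Str.pyGet?_natCast symbol 0
  have hgetm : PySem.Str.pyGet? symbol (-1) = PySem.List.pyGet? symbol.toList (-1) := by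
    simp [PySem.Str.pyGet?_eq]
  have hcnt : PySem.Str.count symbol "." = symbol.toList.count '.' := by
    rw [PySem.Str.count_eq]
    exact pvCount_singleton symbol.toList '.'
  have hisin : PySem.Str.isIn " " symbol = PySem.Chars.isIn [' '] symbol.toList := by
    rw [PySem.Str.isIn_eq]; rfl
  have hemp : (symbol == "") = decide (symbol.toList = []) := by
    cases h : symbol == ""
    · simp only [beq_eq_false_iff_ne, ne_eq] at h
      symm; simp [String.toList_eq_nil_iff, h]
    · have : symbol = "" := by simpa using h
      subst this; rfl
  rw [hget0, hgetm, hcnt, hisin, hemp, ← pvMain symbol.toList]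
  by_cases h : symbol.toList = [] <;> simp [h]

-- ===== VERDICT (by name: the statement is the Claim_ definition above) =====
theorem looks_like_symbol_py_spec : Claim_equal_looks_like_symbol_py := by
  intro value _
  exact pvBody (PySem.Str.upper (PySem.Str.strip (if value == "" then "" else value)))
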